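-- pv_equiv track=rewrite | github.com/FatemehPasban/CreateParallelData | clean_underline.py | clean_underline
-- ===== SOURCE A (Python) =====
-- def clean_underline(s):
--   ss = []
--   for i in range(len(s)) :
--     if '_' in s[i]:
--       l = s[i].split('_')
--       ss.extend(l)
--     else:
--       ss.append(s[i])
--   return ss
-- ===== SOURCE B (Python) =====
-- def clean_underline(s):
--   if not s:
--     return []
--   return '_'.join(s).split('_')
-- ===== Notes on version B (the rewrite author's own statement) =====
-- stated objective: idiomatic
-- what changed: Replaces the per-element loop with branch, split and extend by the single join-then-split idiom: concatenate all elements with '_' and split once (empty list handled separately).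
import Mathlib
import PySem

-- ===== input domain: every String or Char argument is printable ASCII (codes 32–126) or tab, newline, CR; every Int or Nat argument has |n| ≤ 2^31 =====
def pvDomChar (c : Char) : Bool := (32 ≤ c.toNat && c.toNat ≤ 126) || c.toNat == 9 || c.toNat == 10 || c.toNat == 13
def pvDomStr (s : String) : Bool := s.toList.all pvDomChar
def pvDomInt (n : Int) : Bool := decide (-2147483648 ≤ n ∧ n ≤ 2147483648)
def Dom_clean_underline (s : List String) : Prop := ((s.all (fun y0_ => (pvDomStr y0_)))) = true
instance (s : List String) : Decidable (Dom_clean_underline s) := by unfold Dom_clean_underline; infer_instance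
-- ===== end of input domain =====

-- B replaces A's per-element branch/split/extend loop by the single join-then-split idiom (idiomatic; same cost).


-- ===== PORT A =====
-- ss = []; for i in range(len(s)): if '_' in s[i]: ss.extend(s[i].split('_')) else: ss.append(s[i]); return ss
-- (i comes from range(len(s)), so s[i] is always in range and pyGetD's default is never read;
--  the separator "_" is nonempty, so split? is always some and getD's default is never read)
def clean_underline (s : List String) : List String :=
  (PySem.List.pyRange 0 (PySem.List.len s)).foldl
    (fun ss i =>
      let x := PySem.List.pyGetD s i ""
      if PySem.Str.isIn "_" x then
        ss ++ ((PySem.Str.split? x "_").getD [])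
      else
        ss ++ [x]) []

-- ===== PORT B =====
-- if not s: return []  /  return '_'.join(s).split('_')   (separator "_" ≠ "", so split? is always some)
def clean_underline_alt (s : List String) : List String :=
  if s = [] then []
  else (PySem.Str.split? (PySem.Str.join "_" s) "_").getD []

-- ===== PRECONDITION & SPEC =====
def Spec_clean_underline (s : List String) (out : List String) : Prop := out = clean_underline_alt s
instance (s : List String) (out : List String) : Decidable (Spec_clean_underline s out) := by unfold Spec_clean_underline; infer_instance

-- ===== CLAIM (what is proved, stated in full; the proofs are below) =====
def Claim_equal_clean_underline : Prop := ∀ (s : List String), Dom_clean_underline s → Spec_clean_underline s (clean_underline s)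

-- ===== LEMMAS AND PROOFS =====

/-- Splitting a character list on the single character '_', in simple structural form. -/
def usplit : List Char → List (List Char)
  | [] => [[]]
  | c :: rest => if c = '_' then [] :: usplit rest else (usplit rest).modifyHead (c :: ·)

theorem usplit_ne_nil (cs : List Char) : usplit cs ≠ [] := by
  induction cs with
  | nil => simp [usplit]
  | cons c rest ih =>
    simp only [usplit]
    split_ifs
    · simp
    · cases h : usplit rest with
      | nil => exact absurd h ih
      | cons a t => simp [List.modifyHead]

theorem splitOn_go_underscore (fuel : Nat) :
    ∀ (l cur : List Char) (acc : List (List Char)), l.length < fuel →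
      PySem.Chars.splitOn.go ['_'] fuel l cur acc
        = acc.reverse ++ (usplit l).modifyHead (cur.reverse ++ ·) := by
  induction fuel with
  | zero => intro l cur acc h; omega
  | succ n ih =>
    intro l cur acc h
    cases l with
    | nil =>
      rw [PySem.Chars.splitOn.go.eq_def]
      simp [usplit, List.modifyHead]
    | cons c rest =>
      rw [PySem.Chars.splitOn.go.eq_def]
      simp only [List.length_cons] at h
      by_cases hc : c = '_'
      · subst hc
        have hp : (['_'] : List Char).isPrefixOf ('_' :: rest) = true := by
          simp [List.isPrefixOf]
        simp only [usplit, if_pos rfl, hp, if_true, List.length_cons, List.length_nil,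
          List.drop_succ_cons, List.drop_zero]
        rw [ih rest [] (cur.reverse :: acc) (by omega)]
        simp only [List.modifyHead, List.reverse_cons, List.reverse_nil, List.nil_append,
          List.append_assoc, List.cons_append, List.singleton_append]
        cases usplit rest <;> simp
      · have hp : (['_'] : List Char).isPrefixOf (c :: rest) = false := by
          simp [List.isPrefixOf]; exact fun h => absurd h.symm hc
        simp only [usplit, if_neg hc, hp, if_false, Bool.false_eq_true]
        rw [ih rest (c :: cur) acc (by omega)]
        congr 1
        cases hrest : usplit rest with
        | nil => exact absurd hrest (usplit_ne_nil rest)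
        | cons a t => simp [List.modifyHead]

theorem splitOn_underscore (cs : List Char) :
    PySem.Chars.splitOn cs ['_'] = usplit cs := by
  show PySem.Chars.splitOn.go ['_'] (cs.length + 1) cs [] [] = usplit cs
  rw [splitOn_go_underscore (cs.length + 1) cs [] [] (by omega)]
  cases h : usplit cs <;> simp [List.modifyHead]

theorem usplit_append (a b : List Char) :
    usplit (a ++ '_' :: b) = usplit a ++ usplit b := by
  induction a with
  | nil => simp [usplit]
  | cons c rest ih =>
    by_cases hc : c = '_'
    · subst hc; simp [usplit, ih]
    · simp only [List.cons_append, usplit, if_neg hc, ih]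
      cases h : usplit rest with
      | nil => exact absurd h (usplit_ne_nil rest)
      | cons x t => simp [List.modifyHead]

theorem usplit_intercalate (l : List (List Char)) (h : l ≠ []) :
    usplit (List.intercalate ['_'] l) = l.flatMap usplit := by
  induction l with
  | nil => exact absurd rfl h
  | cons a t ih =>
    cases t with
    | nil => simp [List.intercalate]
    | cons b r =>
      have : List.intercalate ['_'] (a :: b :: r) = a ++ '_' :: List.intercalate ['_'] (b :: r) := by
        simp [List.intercalate, List.intersperse]
      rw [this, usplit_append, ih (by simp)]
      simp

theorem usplit_no_underscore (cs : List Char) (h : '_' ∉ cs) : usplit cs = [cs] := by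
  induction cs with
  | nil => rfl
  | cons c rest ih =>
    simp only [List.mem_cons, not_or] at h
    simp [usplit, Ne.symm h.1, ih h.2, List.modifyHead]

theorem split_getD (x : String) :
    (PySem.Str.split? x "_").getD [] = (usplit x.toList).map String.ofList := by
  simp [PySem.Str.split?, PySem.Chars.split?, splitOn_underscore]

theorem gx_eq (x : String) :
    (if PySem.Str.isIn "_" x then (PySem.Str.split? x "_").getD [] else [x])
      = (usplit x.toList).map String.ofList := by
  split_ifs with h
  · exact split_getD x
  · have : ('_' : Char) ∉ x.toList := by
      have := PySem.Chars.isIn_eq_false_iff ("_".toList) x.toList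
      simp only [PySem.Str.isIn] at h
      rw [← List.singleton_infix_iff]
      exact (this.mp (by simpa using h))
    simp [usplit_no_underscore x.toList this]

theorem main_thm (s : List String) : clean_underline s = clean_underline_alt s := by
  unfold clean_underline clean_underline_alt
  have hA : (PySem.List.pyRange 0 (PySem.List.len s)).foldl
      (fun ss i =>
        let x := PySem.List.pyGetD s i ""
        if PySem.Str.isIn "_" x then ss ++ ((PySem.Str.split? x "_").getD []) else ss ++ [x]) []
      = s.flatMap (fun x => (usplit x.toList).map String.ofList) := by
    rw [PySem.List.foldl_pyRange_pyGetD s "" (fun ss x =>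
        if PySem.Str.isIn "_" x then ss ++ ((PySem.Str.split? x "_").getD []) else ss ++ [x]) [] le_rfl]
    simp only [Int.toNat_zero, List.drop_zero]
    have : ∀ (acc : List String) (l : List String),
        l.foldl (fun ss x => if PySem.Str.isIn "_" x then ss ++ ((PySem.Str.split? x "_").getD []) else ss ++ [x]) acc
        = acc ++ l.flatMap (fun x => (usplit x.toList).map String.ofList) := by
      intro acc l
      have h2 := PySem.List.foldl_append_eq_flatMap (fun x => (usplit x.toList).map String.ofList) l acc
      rw [← h2]
      congr 1
      funext ss x
      have := gx_eq x
      split_ifs at this ⊢ <;> simp [this]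
    simpa using this [] s
  rw [hA]
  by_cases hs : s = []
  · subst hs; simp
  · rw [if_neg hs]
    have hjoin : (PySem.Str.join "_" s).toList = List.intercalate ['_'] (s.map String.toList) := by
      simp [PySem.Str.join, PySem.Chars.join, List.intercalate]
    rw [split_getD, hjoin, usplit_intercalate _ (by simpa using hs)]
    rw [List.flatMap_map]
    simp [List.map_flatMap]

-- ===== VERDICT (by name: the statement is the Claim_ definition above) =====
theorem clean_underline_spec : Claim_equal_clean_underline := by
  intro s _
  unfold Spec_clean_underline
  exact main_thm s
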